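-- pv_equiv track=rewrite | github.com/dbis-ukon/lplm | compute_ground_truth.py | LIKE_pattern_to_newLanguage
-- ===== SOURCE A (Python) =====
-- def LIKE_pattern_to_newLanguage(liste):
--     """
--     Transform the LIKE pattern into a new language format using special wildcards.
--
--     Parameters:
--     liste (list of str): The list of pattern segments that were split by '%' from the original LIKE pattern.
--
--     Returns:
--     str: A transformed pattern where each segment is adjusted and combined using the '^' and '$' wildcards.
--     """
--     transformed_pattern = ''
--     for key in liste:
--         if len(key) == 1:
--             transformed_pattern += key
--         else:
--             new = ''
--             count = 0
--             for char in key: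
--                 if count < 1:
--                     new += char
--                     count += 1
--                 else:
--                     if new[-1] != '_' and char != '_' and char != '@' and new[-1] != '@':
--                         new += '$' + char
--                     else:
--                         new += char
--             transformed_pattern += new
--     transformed_pattern = transformed_pattern.replace('_', '^')
--     return transformed_pattern
-- ===== SOURCE B (Python) =====
-- def LIKE_pattern_to_newLanguage(liste):
--     # For each segment, split it into maximal runs of non-wildcard characters
--     # (wildcards '_' and '@' are emitted alone); join each run with '$'.
--     WILD = '_@'
--     def runs(seg):
--         parts = []
--         i = 0
--         n = len(seg)
--         while i < n:
--             if seg[i] in WILD: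
--                 parts.append(seg[i])
--                 i += 1
--             else:
--                 j = i
--                 while j < n and seg[j] not in WILD:
--                     j += 1
--                 parts.append('$'.join(seg[i:j]))
--                 i = j
--         return ''.join(parts)
--     return ''.join(runs(seg) for seg in liste).replace('_', '^')
-- ===== Notes on version B (the rewrite author's own statement) =====
-- stated objective: alternative
-- what changed: Instead of A's stateful char-by-char loop with a lookback at new[-1], B partitions each segment into maximal runs of non-wildcard characters with a two-pointer scan, emits each run joined by '$' and each wildcard alone, then joins and replaces '_' with '^'.
import Mathlib
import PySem

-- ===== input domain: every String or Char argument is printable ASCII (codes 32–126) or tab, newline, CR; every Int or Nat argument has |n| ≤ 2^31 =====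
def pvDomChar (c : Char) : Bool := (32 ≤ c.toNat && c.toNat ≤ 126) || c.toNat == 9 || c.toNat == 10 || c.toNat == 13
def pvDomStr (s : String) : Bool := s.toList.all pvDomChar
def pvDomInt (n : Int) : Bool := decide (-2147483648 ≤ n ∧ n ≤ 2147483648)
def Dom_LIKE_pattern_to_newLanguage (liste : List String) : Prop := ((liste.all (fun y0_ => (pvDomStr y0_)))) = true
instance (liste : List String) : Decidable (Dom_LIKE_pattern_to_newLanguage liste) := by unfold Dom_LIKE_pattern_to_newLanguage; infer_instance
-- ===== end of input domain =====

-- B replaces A's stateful per-character loop (count flag, new[-1] lookback) by partitioning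
-- each segment into maximal runs of non-wildcard characters and '$'-joining each run;
-- same return value, no speed claim.

-- ===== PORT A =====
-- A's inner loop over the characters of one segment; state: new (accumulated chars), count.
-- Python reads new[-1] only when count ≥ 1, where new is nonempty; ported as getLastD.
def pvAInner : List Char → List Char → Int → List Char
  | [], new, _ => new
  | c :: rest, new, count =>
    if count < 1 then pvAInner rest (new ++ [c]) (count + 1)
    else
      if new.getLastD ' ' ≠ '_' ∧ c ≠ '_' ∧ c ≠ '@' ∧ new.getLastD ' ' ≠ '@' then
        pvAInner rest (new ++ ['$', c]) count
      else
        pvAInner rest (new ++ [c]) count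

def LIKE_pattern_to_newLanguage (liste : List String) : String :=
  let transformed := liste.foldl (fun acc key =>
    if key.toList.length = 1 then acc ++ key.toList
    else acc ++ pvAInner key.toList [] 0) ([] : List Char)
  String.ofList (PySem.Chars.replace transformed ['_'] ['^'])

-- ===== PORT B =====
-- Source B's run scanner: a wildcard char is emitted alone; otherwise the maximal
-- non-wildcard run starting here (the inner while loop = takeWhile/dropWhile)
-- is emitted joined by '$' ('$'.join = intersperse).
def pvWild (c : Char) : Bool := c == '_' || c == '@'

def pvRuns : List Char → List Char
  | [] => []
  | c :: rest =>
    if pvWild c then c :: pvRuns rest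
    else
      List.intersperse '$' (c :: rest.takeWhile (fun x => ¬ pvWild x))
        ++ pvRuns (rest.dropWhile (fun x => ¬ pvWild x))
termination_by l => l.length
decreasing_by
  · simp
  · exact Nat.lt_succ_of_le (List.length_dropWhile_le _ _)

def LIKE_pattern_to_newLanguage_alt (liste : List String) : String :=
  String.ofList (PySem.Chars.replace (liste.flatMap (fun seg => pvRuns seg.toList)) ['_'] ['^'])

-- ===== PRECONDITION & SPEC =====
def Spec_LIKE_pattern_to_newLanguage (liste : List String) (out : String) : Prop := out = LIKE_pattern_to_newLanguage_alt liste
instance (liste : List String) (out : String) : Decidable (Spec_LIKE_pattern_to_newLanguage liste out) := by unfold Spec_LIKE_pattern_to_newLanguage; infer_instance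

-- ===== CLAIM (what is proved, stated in full; the proofs are below) =====
def Claim_equal_LIKE_pattern_to_newLanguage : Prop := ∀ (liste : List String), Dom_LIKE_pattern_to_newLanguage liste → Spec_LIKE_pattern_to_newLanguage liste (LIKE_pattern_to_newLanguage liste)

-- ===== LEMMAS AND PROOFS =====

-- what A's loop emits after the first character, as a recursion on (previous char, rest)
def pvTail (a : Char) : List Char → List Char
  | [] => []
  | c :: rest =>
    (if a ≠ '_' ∧ c ≠ '_' ∧ c ≠ '@' ∧ a ≠ '@' then ['$', c] else [c]) ++ pvTail c rest

theorem pvAInner_one (cs : List Char) : ∀ (new : List Char) (a : Char),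
    pvAInner cs (new ++ [a]) 1 = new ++ [a] ++ pvTail a cs := by
  induction cs with
  | nil => intro new a; simp [pvAInner, pvTail]
  | cons c rest ih =>
    intro new a
    simp only [pvAInner, pvTail]
    rw [if_neg (by norm_num)]
    have hlast : (new ++ [a]).getLastD ' ' = a := by simp
    rw [hlast]
    by_cases h : a ≠ '_' ∧ c ≠ '_' ∧ c ≠ '@' ∧ a ≠ '@'
    · rw [if_pos h, if_pos h]
      have : new ++ [a] ++ ['$', c] = (new ++ [a] ++ ['$']) ++ [c] := by simp
      rw [this, ih]
      simp
    · rw [if_neg h, if_neg h]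
      have : new ++ [a] ++ [c] = (new ++ [a]) ++ [c] := by simp
      rw [this, ih]
      simp

theorem pvRuns_cons (rest : List Char) : ∀ (a : Char),
    pvRuns (a :: rest) = a :: pvTail a rest := by
  induction rest with
  | nil =>
    intro a
    by_cases h : pvWild a = true <;> simp [pvRuns, pvTail, h]
  | cons c rs ih =>
    intro a
    have hc := ih c
    by_cases ha : pvWild a = true
    · have haw : a = '_' ∨ a = '@' := by
        simpa [pvWild] using ha
      rw [pvRuns, if_pos ha, hc, pvTail,
        if_neg (by rcases haw with h | h <;> simp [h])]
      simp
    · by_cases hcw : pvWild c = true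
      · have hcw' : c = '_' ∨ c = '@' := by simpa [pvWild] using hcw
        have hnot : ¬(a ≠ '_' ∧ c ≠ '_' ∧ c ≠ '@' ∧ a ≠ '@') := by tauto
        rw [pvRuns, if_neg ha, List.takeWhile_cons, List.dropWhile_cons]
        simp [hcw, hc, pvTail, hnot]
      · have hcw'' : ¬(c = '_' ∨ c = '@') := by simpa [pvWild] using hcw
        have haw : ¬(a = '_' ∨ a = '@') := by simpa [pvWild] using ha
        have hcond : a ≠ '_' ∧ c ≠ '_' ∧ c ≠ '@' ∧ a ≠ '@' := by tauto
        rw [pvRuns, if_neg ha, List.takeWhile_cons, List.dropWhile_cons]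
        rw [pvRuns, if_neg hcw] at hc
        simp [hcw, pvTail, hcond, ← hc]

theorem pvASeg_eq_pvRuns (k : List Char) :
    (if k.length = 1 then k else pvAInner k [] 0) = pvRuns k := by
  match k with
  | [] => simp [pvAInner, pvRuns]
  | [c] => rw [if_pos (by simp), pvRuns_cons]; simp [pvTail]
  | c :: b :: rs =>
    rw [if_neg (by simp)]
    show pvAInner (c :: b :: rs) [] 0 = pvRuns (c :: b :: rs)
    have h0 : pvAInner (c :: b :: rs) [] 0 = pvAInner (b :: rs) ([] ++ [c]) 1 := by
      simp [pvAInner]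
    rw [h0, pvAInner_one, pvRuns_cons]
    simp

theorem pvAFold_eq (liste : List String) : ∀ (acc : List Char),
    liste.foldl (fun acc key =>
      if key.toList.length = 1 then acc ++ key.toList
      else acc ++ pvAInner key.toList [] 0) acc
    = acc ++ liste.flatMap (fun seg => pvRuns seg.toList) := by
  induction liste with
  | nil => intro acc; simp
  | cons k rest ih =>
    intro acc
    simp only [List.foldl_cons, List.flatMap_cons, ih]
    have := pvASeg_eq_pvRuns k.toList
    by_cases h : k.toList.length = 1
    · rw [if_pos h]; rw [if_pos h] at this; conv_lhs => rw [this]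
      simp
    · rw [if_neg h]; rw [if_neg h] at this; conv_lhs => rw [this]
      simp

-- ===== VERDICT (by name: the statement is the Claim_ definition above) =====
theorem LIKE_pattern_to_newLanguage_spec : Claim_equal_LIKE_pattern_to_newLanguage := by
  intro liste _
  show LIKE_pattern_to_newLanguage liste = LIKE_pattern_to_newLanguage_alt liste
  unfold LIKE_pattern_to_newLanguage LIKE_pattern_to_newLanguage_alt
  rw [pvAFold_eq]
  simp
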